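-- pv_equiv track=rewrite | github.com/theivankulikov/LeetCode75 | gcdOfStrings.py | checkStringForDivider
-- ===== SOURCE A (Python) =====
-- def checkStringForDivider(in_str:str, divider:str):
--     if len(in_str) % len(divider) != 0:
--          return False
--     l_divider = len(divider)
--     j = 0
--     while j < len(in_str):
--         if divider != in_str[j:j + l_divider]:
--             return False
--         j = j + l_divider
--     return True
-- ===== SOURCE B (Python) =====
-- def checkStringForDivider(in_str: str, divider: str):
--     if len(in_str) % len(divider) != 0:
--         return False
--     return in_str == divider * (len(in_str) // len(divider))
-- ===== Notes on version B (the rewrite author's own statement) =====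
-- stated objective: idiomatic
-- what changed: B replaces A's index loop comparing successive slices (with early termination) by building the tiled candidate string divider * (len(in_str)//len(divider)) once and doing a single equality comparison.
import Mathlib
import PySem

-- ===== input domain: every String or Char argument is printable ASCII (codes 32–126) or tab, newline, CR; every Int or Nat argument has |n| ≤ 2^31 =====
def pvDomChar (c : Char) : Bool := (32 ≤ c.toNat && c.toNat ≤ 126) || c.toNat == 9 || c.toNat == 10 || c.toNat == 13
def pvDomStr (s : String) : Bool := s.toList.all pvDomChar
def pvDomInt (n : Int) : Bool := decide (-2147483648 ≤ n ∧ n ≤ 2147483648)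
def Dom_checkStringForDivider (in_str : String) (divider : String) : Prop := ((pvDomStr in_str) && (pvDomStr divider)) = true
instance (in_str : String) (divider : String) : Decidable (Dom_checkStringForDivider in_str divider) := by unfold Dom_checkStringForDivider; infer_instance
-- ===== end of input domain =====

-- B builds the tiled candidate string once and compares in one equality, instead of A's
-- index loop over successive slices with early termination (objective: idiomatic; same cost).

-- ===== PORT A =====
-- A's while loop: j starts at 0 and grows by divider's length each step; ported as a
-- fuel recursion (fuel = in_str's length at the call, enough iterations whenever the
-- loop is reached, since the loop is only reached with divider ≠ "" under Pre_).
def checkA_loop (s d : List Char) (j : Nat) : Nat → Bool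
  | 0 => true
  | fuel + 1 =>
    if j < s.length then
      if d ≠ PySem.List.slice s (some (j : Int)) (some ((j : Int) + (d.length : Int))) then
        false
      else
        checkA_loop s d (j + d.length) fuel
    else
      true

def checkStringForDivider (in_str : String) (divider : String) : Bool :=
  let s := in_str.toList
  let d := divider.toList
  if s.length % d.length ≠ 0 then
    false
  else
    checkA_loop s d 0 s.length

-- ===== PORT B =====
def checkStringForDivider_alt (in_str : String) (divider : String) : Bool :=
  let s := in_str.toList
  let d := divider.toList
  if s.length % d.length ≠ 0 then
    false
  else
    decide (s = (List.replicate (s.length / d.length) d).flatten)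

-- ===== PRECONDITION & SPEC =====
-- Pre_ excludes exactly the empty divider, on which Python's len(in_str) % len(divider)
-- raises ZeroDivisionError in both A and B.
def Pre_checkStringForDivider (in_str : String) (divider : String) : Prop := divider ≠ ""
instance (in_str : String) (divider : String) : Decidable (Pre_checkStringForDivider in_str divider) := by unfold Pre_checkStringForDivider; infer_instance

def pvWitness_checkStringForDivider : String × String := ("abab", "ab")

def Spec_checkStringForDivider (in_str : String) (divider : String) (out : Bool) : Prop := out = checkStringForDivider_alt in_str divider
instance (in_str : String) (divider : String) (out : Bool) : Decidable (Spec_checkStringForDivider in_str divider out) := by unfold Spec_checkStringForDivider; infer_instance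

-- ===== CLAIM (what is proved, stated in full; the proofs are below) =====
def Claim_equal_checkStringForDivider : Prop := ∀ (in_str : String) (divider : String), Dom_checkStringForDivider in_str divider → Pre_checkStringForDivider in_str divider → Spec_checkStringForDivider in_str divider (checkStringForDivider in_str divider)

-- ===== LEMMAS AND PROOFS =====

-- A's loop, started at offset j with s.length - j = k * d.length and enough fuel,
-- decides whether the suffix s.drop j is k copies of d.
theorem checkA_loop_eq (d : List Char) (hd : d ≠ []) :
    ∀ (k : Nat) (s : List Char) (j fuel : Nat), j ≤ s.length →
      s.length - j = k * d.length → k ≤ fuel →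
      checkA_loop s d j fuel = decide (s.drop j = (List.replicate k d).flatten) := by
  intro k
  induction k with
  | zero =>
    intro s j fuel hj hk _
    have hje : j = s.length := by omega
    have hdrop : s.drop j = [] := by subst hje; simp
    cases fuel with
    | zero => simp [checkA_loop, hdrop]
    | succ f =>
      have : ¬ j < s.length := by omega
      simp [checkA_loop, this, hdrop]
  | succ k ih =>
    intro s j fuel hj hk hfuel
    have hdl : 0 < d.length := List.length_pos_iff.mpr hd
    have hm : s.length - j = k * d.length + d.length := by
      rw [hk]; ring
    have hjlt : j < s.length := by omega
    obtain ⟨f, rfl⟩ : ∃ f, fuel = f + 1 := ⟨fuel - 1, by omega⟩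
    rw [checkA_loop]
    simp only [hjlt, if_pos]
    have hslice : PySem.List.slice s (some (j : Int)) (some ((j : Int) + (d.length : Int)))
        = (s.drop j).take d.length := PySem.List.slice_natCast_add s j d.length
    have hdd : List.drop d.length (List.drop j s) = List.drop (j + d.length) s := by
      rw [List.drop_drop, Nat.add_comm]
    have hdropsplit : s.drop j = (s.drop j).take d.length ++ s.drop (j + d.length) := by
      rw [← hdd]
      exact (List.take_append_drop _ _).symm
    have hdroplen : (s.drop j).length = k * d.length + d.length := by
      rw [List.length_drop]; exact hm
    have hlen : ((s.drop j).take d.length).length = d.length := by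
      rw [List.length_take, hdroplen]; omega
    have hrepl : (List.replicate (k + 1) d).flatten = d ++ (List.replicate k d).flatten := by
      simp [List.replicate_succ]
    by_cases hcmp : d = (s.drop j).take d.length
    · have hne : ¬ d ≠ PySem.List.slice s (some (j : Int)) (some ((j : Int) + (d.length : Int))) := by
        simp only [ne_eq, not_not]
        rw [hslice]; exact hcmp
      rw [if_neg hne]
      rw [ih s (j + d.length) f (by omega) (by omega) (by omega)]
      have hiff : (s.drop (j + d.length) = (List.replicate k d).flatten)
          ↔ (s.drop j = (List.replicate (k + 1) d).flatten) := by
        rw [hrepl]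
        constructor
        · intro h
          rw [hdropsplit, ← hcmp, h]
        · intro h
          rw [hdropsplit, ← hcmp] at h
          exact List.append_inj_right h rfl
      exact decide_eq_decide.mpr hiff
    · have hne : d ≠ PySem.List.slice s (some (j : Int)) (some ((j : Int) + (d.length : Int))) := by
        rw [hslice]; exact hcmp
      rw [if_pos hne]
      have hno : ¬ s.drop j = (List.replicate (k + 1) d).flatten := by
        intro h
        rw [hrepl, hdropsplit] at h
        exact hcmp (List.append_inj_left h (by rw [hlen])).symm
      simp [hno]

-- ===== VERDICT (by name: the statement is the Claim_ definition above) =====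
theorem checkStringForDivider_spec : Claim_equal_checkStringForDivider := by
  intro in_str divider _ hpre
  unfold Spec_checkStringForDivider checkStringForDivider checkStringForDivider_alt
  set s := in_str.toList with hs
  set d := divider.toList with hdl
  have hd : d ≠ [] := by
    intro h
    apply hpre
    have := congrArg String.ofList h
    simpa [hdl] using this
  have hdpos : 0 < d.length := List.length_pos_iff.mpr hd
  by_cases hmod : s.length % d.length = 0
  · simp only [hmod, ne_eq, not_true_eq_false, if_false]
    have hk : s.length = (s.length / d.length) * d.length := by
      exact (Nat.div_mul_cancel (Nat.dvd_of_mod_eq_zero hmod)).symm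
    have := checkA_loop_eq d hd (s.length / d.length) s 0 s.length (by omega)
      (by omega) (Nat.div_le_self _ _)
    rw [this]
    simp
  · simp [hmod]
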